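-- pv_equiv track=rewrite | github.com/mirzadm/leetcode | src/p0402_remove_k_digits.py | remove_one_digit
-- ===== SOURCE A (Python) =====
-- def remove_one_digit(num: str) -> str:
--     """Removes one digit from `num` resulting in smallest number."""
--     flag = False
--     for i in range(len(num) - 1):
--         if int(num[i]) > int(num[i + 1]):
--             flag = True
--             break
--     if flag:
--         return num[:i] + num[i + 1:]
--     else:
--         return num[:len(num) - 1]
-- ===== SOURCE B (Python) =====
-- def remove_one_digit(num: str) -> str:
--     """Removes one digit from `num` resulting in smallest number."""
--     stack = []
--     removed = False
--     for d in num: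
--         if not removed and stack and int(stack[-1]) > int(d):
--             stack.pop()
--             removed = True
--         stack.append(d)
--     if not removed:
--         stack = stack[:-1]
--     return ''.join(stack)
-- ===== Notes on version B (the rewrite author's own statement) =====
-- stated objective: alternative
-- what changed: Replaces the index scan with a break flag plus two slice concatenations by a single monotonic-stack pass that pops at most once and joins the stack at the end.
import Mathlib
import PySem

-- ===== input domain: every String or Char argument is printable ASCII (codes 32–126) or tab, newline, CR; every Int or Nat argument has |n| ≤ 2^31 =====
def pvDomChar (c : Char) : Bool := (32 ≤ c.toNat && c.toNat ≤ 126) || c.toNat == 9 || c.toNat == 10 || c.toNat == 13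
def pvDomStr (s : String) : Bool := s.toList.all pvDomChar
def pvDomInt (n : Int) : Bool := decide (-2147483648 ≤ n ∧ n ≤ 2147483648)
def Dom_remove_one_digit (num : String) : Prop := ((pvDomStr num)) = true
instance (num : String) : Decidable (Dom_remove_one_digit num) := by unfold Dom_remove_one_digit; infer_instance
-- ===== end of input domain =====

-- B replaces A's break-flag scan plus two slice concatenations by a single
-- monotonic-stack pass (pop at most once, then join the stack): alternative decomposition, same cost.

-- ===== PORT A =====
-- int(num[i]) > int(num[i+1]): on the digit characters Pre_ guarantees, int order
-- coincides with character-code order, so the comparison is ported as Char.toNat order.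
-- findBreakA returns the index of the first adjacent descent (Python's leftover `i` at break).
def findBreakA : List Char → Option Nat
  | a :: b :: t =>
      if a.toNat > b.toNat then some 0
      else (findBreakA (b :: t)).map (· + 1)
  | _ => none

def remove_one_digit (num : String) : String :=
  let l := num.toList
  match findBreakA l with
  | some i => String.ofList (l.take i ++ l.drop (i + 1))   -- num[:i] + num[i+1:]
  | none => String.ofList (l.take (l.length - 1))          -- num[:len(num)-1]

-- ===== PORT B =====
-- Monotonic stack kept head-first (head = top); pop-once-then-lock via `removed`.
def altStep : List Char × Bool → Char → List Char × Bool
  | (stack, removed), d =>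
      match removed, stack with
      | false, top :: rest =>
          -- not removed and stack and int(stack[-1]) > int(d)
          if top.toNat > d.toNat then
            (d :: rest, true)        -- stack.pop(); stack.append(d); removed = True
          else
            (d :: stack, false)      -- stack.append(d)
      | _, _ => (d :: stack, removed)  -- stack.append(d)

def remove_one_digit_alt (num : String) : String :=
  let res := num.toList.foldl altStep ([], false)
  let stack := if res.2 then res.1 else res.1.tail     -- if not removed: stack = stack[:-1]
  String.ofList stack.reverse                              -- ''.join(stack)

-- ===== PRECONDITION & SPEC =====
-- Pre_ excludes exactly the inputs on which A raises ValueError: strings of length ≥ 2 whose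
-- scan reaches a non-digit character before the first descent, i.e. Pre_ holds iff the string
-- is short, all digits, or its digit prefix has an adjacent descent (some zipped pair out of order).
def Pre_remove_one_digit (num : String) : Prop :=
  num.toList.length ≤ 1 ∨
  num.toList.all Char.isDigit = true ∨
  ((num.toList.takeWhile Char.isDigit).zip (num.toList.takeWhile Char.isDigit).tail).all
    (fun ab => ab.1.toNat ≤ ab.2.toNat) = false

instance (num : String) : Decidable (Pre_remove_one_digit num) := by
  unfold Pre_remove_one_digit; infer_instance

def pvWitness_remove_one_digit : String := "51"

def Spec_remove_one_digit (num : String) (out : String) : Prop := out = remove_one_digit_alt num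
instance (num : String) (out : String) : Decidable (Spec_remove_one_digit num out) := by unfold Spec_remove_one_digit; infer_instance

-- ===== CLAIM (what is proved, stated in full; the proofs are below) =====
def Claim_equal_remove_one_digit : Prop := ∀ (num : String), Dom_remove_one_digit num → Pre_remove_one_digit num → Spec_remove_one_digit num (remove_one_digit num)

-- ===== LEMMAS AND PROOFS =====

theorem foldl_altStep_removed (l : List Char) (acc : List Char) :
    l.foldl altStep (acc, true) = (l.reverse ++ acc, true) := by
  induction l generalizing acc with
  | nil => simp [List.foldl]
  | cons d t ih => simp [List.foldl, altStep, ih]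

theorem foldl_altStep_main (l : List Char) (p : Char) (acc : List Char) :
    l.foldl altStep (p :: acc, false) =
      match findBreakA (p :: l) with
      | some i => (((p :: l).take i ++ (p :: l).drop (i + 1)).reverse ++ acc, true)
      | none => (l.reverse ++ p :: acc, false) := by
  induction l generalizing p acc with
  | nil => simp [List.foldl, findBreakA]
  | cons d t ih =>
    by_cases h : p.toNat > d.toNat
    · simp [List.foldl, altStep, h, findBreakA, foldl_altStep_removed]
    · have step : altStep (p :: acc, false) d = (d :: p :: acc, false) := by
        simp [altStep, h]
      rw [List.foldl_cons, step, ih d (p :: acc)]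
      rcases hb : findBreakA (d :: t) with _ | i
      · simp [findBreakA, h, hb]
      · simp [findBreakA, h, hb]

theorem tail_reverse_eq_dropLast_reverse (l : List Char) :
    (l.reverse).tail.reverse = l.dropLast := by
  rcases h : l.reverse with _ | ⟨a, t⟩
  · simp_all
  · have : l = (a :: t).reverse := by rw [← h, List.reverse_reverse]
    subst this
    simp

-- ===== VERDICT (by name: the statement is the Claim_ definition above) =====
theorem remove_one_digit_spec : Claim_equal_remove_one_digit := by
  intro num _ _
  unfold Spec_remove_one_digit remove_one_digit remove_one_digit_alt
  rcases h : num.toList with _ | ⟨c, t⟩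
  · simp [findBreakA, List.foldl]
  · rw [List.foldl_cons, show altStep ([], false) c = ([c], false) from by simp [altStep],
        foldl_altStep_main t c []]
    rcases hb : findBreakA (c :: t) with _ | i
    · simp only [hb]
      have hd : (t.reverse ++ [c]).tail.reverse = (c :: t).dropLast := by
        simpa using tail_reverse_eq_dropLast_reverse (c :: t)
      simp [hd, List.dropLast_eq_take]
    · simp only [hb]
      simp
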